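-- pv_equiv track=rewrite | github.com/wtthornton/TappsMCP | packages/tapps-mcp/src/tapps_mcp/benchmark/call_patterns.py | _find_common_sequences
-- ===== SOURCE A (Python) =====
-- from collections import Counter
--
-- _SEQUENCE_MIN_COUNT = 2
--
-- def _find_common_sequences(
--     sequences: list[list[str]],
-- ) -> list[list[str]]:
--     """Find the most common tool call sequences.
--
--     Counts exact-match sequences and returns those appearing at
--     least ``_SEQUENCE_MIN_COUNT`` times.
--     """
--     counter: Counter[tuple[str, ...]] = Counter()
--     for seq in sequences:
--         key = tuple(seq)
--         counter[key] += 1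
--
--     common: list[list[str]] = []
--     for seq_tuple, count in counter.most_common(10):
--         if count >= _SEQUENCE_MIN_COUNT:
--             common.append(list(seq_tuple))
--
--     return common
-- ===== SOURCE B (Python) =====
-- _SEQUENCE_MIN_COUNT = 2
--
--
-- def _find_common_sequences(sequences):
--     """Bucket (pigeonhole) selection: group the distinct sequences by their
--     count, then read the buckets from the highest count down to the
--     threshold, stopping after 10 results.  No sort and no heap."""
--     counts = {}
--     for seq in sequences:
--         key = tuple(seq)
--         counts[key] = counts.get(key, 0) + 1
--
--     buckets = {}
--     for key, cnt in counts.items():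
--         buckets.setdefault(cnt, []).append(key)
--
--     common = []
--     c = max(buckets, default=0)
--     while c >= _SEQUENCE_MIN_COUNT and len(common) < 10:
--         for key in buckets.get(c, []):
--             if len(common) == 10:
--                 break
--             common.append(list(key))
--         c -= 1
--     return common
-- ===== Notes on version B (the rewrite author's own statement) =====
-- stated objective: alternative
-- what changed: Replaced Counter.most_common(10) (heap/sort top-k selection followed by the >=2 filter) by pigeonhole selection: a second dict that buckets the distinct sequences by their count, read from the maximum count down to the threshold 2, stopping after 10 results.
import Mathlib
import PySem

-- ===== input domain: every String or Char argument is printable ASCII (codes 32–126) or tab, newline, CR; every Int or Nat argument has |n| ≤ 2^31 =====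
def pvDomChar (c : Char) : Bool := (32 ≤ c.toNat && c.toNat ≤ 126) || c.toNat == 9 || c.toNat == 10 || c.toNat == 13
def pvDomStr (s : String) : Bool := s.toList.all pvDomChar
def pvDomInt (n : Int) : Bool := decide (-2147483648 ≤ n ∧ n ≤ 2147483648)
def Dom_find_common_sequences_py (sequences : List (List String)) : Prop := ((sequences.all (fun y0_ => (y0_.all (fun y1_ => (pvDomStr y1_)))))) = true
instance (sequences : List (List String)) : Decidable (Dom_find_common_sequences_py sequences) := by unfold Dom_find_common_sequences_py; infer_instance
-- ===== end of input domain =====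

-- B replaces Counter.most_common(10) (top-k selection over the counts) by pigeonhole
-- selection: a second dict bucketing the distinct sequences by count, read from the
-- maximum count downwards (objective: alternative, same result).

-- ===== PORT A =====
-- counter[tuple(seq)] += 1 over a Counter, then most_common(10) (= stable descending
-- sort by count, first 10), appending list(key) when count >= 2.
def find_common_sequences_py (sequences : List (List String)) : List (List String) :=
  let counter : PySem.Dict (List String) Int :=
    sequences.foldl (fun d seq => d.modify seq 0 (· + 1)) PySem.Dict.empty
  let ranked := (PySem.List.sorted counter.items (fun p => p.2) true).take 10
  ranked.foldl (fun common p => if p.2 ≥ 2 then common ++ [p.1] else common) []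

-- ===== PORT B =====
-- inner 'for key in buckets.get(c, [])' with the 'if len(common) == 10: break'
def bucketInner (common : List (List String)) (keys : List (List String)) : List (List String) :=
  match keys with
  | [] => common
  | k :: rest => if common.length = 10 then common else bucketInner (common ++ [k]) rest

-- outer 'while c >= 2 and len(common) < 10: … ; c -= 1'
def bucketLoop (buckets : PySem.Dict Int (List (List String))) (c : Int)
    (common : List (List String)) : List (List String) :=
  if h : 2 ≤ c ∧ common.length < 10 then
    bucketLoop buckets (c - 1) (bucketInner common (buckets.getD c []))
  else common
termination_by c.toNat
decreasing_by omega

-- counts[key] = counts.get(key, 0) + 1; buckets.setdefault(cnt, []).append(key);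
-- c = max(buckets, default=0); then the while loop above.
def find_common_sequences_py_alt (sequences : List (List String)) : List (List String) :=
  let counts : PySem.Dict (List String) Int :=
    sequences.foldl (fun d seq => d.insert seq (d.getD seq 0 + 1)) PySem.Dict.empty
  let buckets : PySem.Dict Int (List (List String)) :=
    counts.items.foldl (fun d p => d.modify p.2 [] (· ++ [p.1])) PySem.Dict.empty
  let c0 := PySem.List.maxD buckets.keys (fun x => x) 0
  bucketLoop buckets c0 []

-- ===== PRECONDITION & SPEC =====
def Spec_find_common_sequences_py (sequences : List (List String)) (out : List (List String)) : Prop := out = find_common_sequences_py_alt sequences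
instance (sequences : List (List String)) (out : List (List String)) : Decidable (Spec_find_common_sequences_py sequences out) := by unfold Spec_find_common_sequences_py; infer_instance

-- ===== CLAIM (what is proved, stated in full; the proofs are below) =====
def Claim_equal_find_common_sequences_py : Prop := ∀ (sequences : List (List String)), Dom_find_common_sequences_py sequences → Spec_find_common_sequences_py sequences (find_common_sequences_py sequences)

-- ===== LEMMAS AND PROOFS =====

-- buckets c, c-1, …, 1 in first-seen order (the stable descending sort, decomposed)
def pvBucketsCat (D : List (List String)) (cnt : List String → Int) : Nat → List (List String)
  | 0 => []
  | n+1 => D.filter (fun k => cnt k == ((n : Int) + 1)) ++ pvBucketsCat D cnt n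

-- buckets j+1, j, …, 2 in first-seen order (what the while loop emits, untruncated)
def pvBucketsHi (D : List (List String)) (cnt : List String → Int) : Nat → List (List String)
  | 0 => []
  | j+1 => D.filter (fun k => cnt k == ((j : Int) + 2)) ++ pvBucketsHi D cnt j

theorem mem_pvBucketsCat {D : List (List String)} {cnt : List String → Int} {n : Nat}
    {x : List String} (hx : x ∈ pvBucketsCat D cnt n) : cnt x ≤ (n : Int) := by
  induction n with
  | zero => simp [pvBucketsCat] at hx
  | succ n ih =>
      simp only [pvBucketsCat, List.mem_append, List.mem_filter] at hx
      rcases hx with ⟨_, h⟩ | h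
      · simp only [beq_iff_eq] at h; omega
      · have := ih h; push_cast; omega

theorem mem_pvBucketsHi {D : List (List String)} {cnt : List String → Int} {j : Nat}
    {x : List String} (hx : x ∈ pvBucketsHi D cnt j) : 2 ≤ cnt x := by
  induction j with
  | zero => simp [pvBucketsHi] at hx
  | succ j ih =>
      simp only [pvBucketsHi, List.mem_append, List.mem_filter] at hx
      rcases hx with ⟨_, h⟩ | h
      · simp only [beq_iff_eq] at h; omega
      · exact ih h

theorem pvBucketsCat_snoc_of_gt {D : List (List String)} {cnt : List String → Int}
    {x : List String} {n : Nat} (h : (n : Int) < cnt x) :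
    pvBucketsCat (D ++ [x]) cnt n = pvBucketsCat D cnt n := by
  induction n with
  | zero => simp [pvBucketsCat]
  | succ n ih =>
      have hx : (cnt x == ((n : Int) + 1)) = false := by
        simp only [beq_eq_false_iff_ne]; omega
      simp only [pvBucketsCat, List.filter_append, List.filter_cons, hx]
      rw [ih (by omega)]
      simp

theorem insertBy_append_not_before {α : Type} (before : α → α → Bool) (x : α)
    (l r : List α) (h : ∀ y ∈ l, before x y = false) :
    PySem.List.insertBy before x (l ++ r) = l ++ PySem.List.insertBy before x r := by
  induction l with
  | nil => simp
  | cons y t ih =>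
      have hy : before x y = false := h y (by simp)
      simp only [List.cons_append, PySem.List.insertBy, hy]
      simp [ih (fun z hz => h z (by simp [hz]))]

theorem insertBy_all_before {α : Type} (before : α → α → Bool) (x : α)
    (r : List α) (h : ∀ y ∈ r, before x y = true) :
    PySem.List.insertBy before x r = x :: r := by
  cases r with
  | nil => rfl
  | cons y t => simp [PySem.List.insertBy, h y (by simp)]

theorem insertBy_pvBucketsCat {D : List (List String)} {cnt : List String → Int}
    {x : List String} {M : Nat} (h1 : 1 ≤ cnt x) (h2 : cnt x ≤ (M : Int)) :
    PySem.List.insertBy (fun a b => decide (cnt b < cnt a)) x (pvBucketsCat D cnt M)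
      = pvBucketsCat (D ++ [x]) cnt M := by
  induction M with
  | zero => simp at h2; omega
  | succ M ih =>
      by_cases hc : cnt x = (M : Int) + 1
      · rw [pvBucketsCat, insertBy_append_not_before _ _ _ _ (by
          intro y hy
          simp only [List.mem_filter, beq_iff_eq] at hy
          simp [hy.2, hc])]
        rw [insertBy_all_before _ _ _ (by
          intro y hy
          have := mem_pvBucketsCat hy
          simp only [decide_eq_true_eq]; omega)]
        rw [pvBucketsCat, pvBucketsCat_snoc_of_gt (by omega)]
        simp [List.filter_append, hc]
      · have hx2 : cnt x ≤ (M : Int) := by push_cast at h2 ⊢; omega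
        rw [pvBucketsCat, insertBy_append_not_before _ _ _ _ (by
          intro y hy
          simp only [List.mem_filter, beq_iff_eq] at hy
          simp only [decide_eq_false_iff_not, not_lt]
          omega)]
        rw [ih hx2, pvBucketsCat]
        have hne : (cnt x == ((M : Int) + 1)) = false := by
          simp only [beq_eq_false_iff_ne]; exact hc
        simp [List.filter_append, hne]

-- the stable descending sort by count IS the bucket concatenation
theorem sorted_eq_pvBucketsCat (D : List (List String)) (cnt : List String → Int) (M : Nat)
    (h : ∀ k ∈ D, 1 ≤ cnt k ∧ cnt k ≤ (M : Int)) :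
    PySem.List.sorted D cnt true = pvBucketsCat D cnt M := by
  rw [PySem.List.sorted_rev_eq_foldl_insertBy]
  induction D using List.reverseRecOn with
  | nil =>
      induction M with
      | zero => rfl
      | succ M ih => simp [pvBucketsCat, ← ih (by simp)]
  | append_singleton D x ih =>
      rw [List.foldl_append, List.foldl_cons, List.foldl_nil,
          ih (fun k hk => h k (by simp [hk]))]
      exact insertBy_pvBucketsCat (h x (by simp)).1 (h x (by simp)).2

theorem pvBucketsCat_split (D : List (List String)) (cnt : List String → Int) (j : Nat) :
    pvBucketsCat D cnt (j + 1)
      = pvBucketsHi D cnt j ++ D.filter (fun k => cnt k == (1 : Int)) := by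
  induction j with
  | zero => simp [pvBucketsCat, pvBucketsHi]
  | succ j ih =>
      rw [pvBucketsCat, ih, pvBucketsHi]
      have hc : (((j + 1 : Nat)) : Int) + 1 = (j : Int) + 2 := by push_cast; ring
      simp only [hc, List.append_assoc]

theorem take_take_append {α : Type} (b r : List α) (t : Nat) :
    ((b.take t) ++ r).take t = (b ++ r).take t := by
  rw [List.take_append, List.take_append, List.take_take, Nat.min_self, List.length_take]
  congr 2
  omega

theorem take_append_left (a X : List (List String)) (h : a.length ≤ 10) :
    (a ++ X).take 10 = a ++ X.take (10 - a.length) := by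
  rw [List.take_append, List.take_of_length_le h]

theorem take_absorb (a b r : List (List String)) (hlt : a.length < 10) :
    ((a ++ b.take (10 - a.length)) ++ r).take 10 = (a ++ (b ++ r)).take 10 := by
  rw [List.append_assoc, take_append_left _ _ (le_of_lt hlt),
      take_append_left _ _ (le_of_lt hlt)]
  congr 1
  exact take_take_append b r (10 - a.length)

theorem bucketInner_eq (keys common : List (List String)) (h : common.length ≤ 10) :
    bucketInner common keys = common ++ keys.take (10 - common.length) := by
  induction keys generalizing common with
  | nil => simp [bucketInner]
  | cons k rest ih =>
      rw [bucketInner]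
      by_cases h10 : common.length = 10
      · simp [h10]
      · have hlt : common.length < 10 := by omega
        simp only [if_neg h10]
        rw [ih (common ++ [k]) (by simp; omega)]
        have : 10 - common.length = (10 - (common ++ [k]).length) + 1 := by
          simp; omega
        rw [this, List.take_succ_cons]
        simp

theorem bucketLoop_eq (buckets : PySem.Dict Int (List (List String)))
    (D : List (List String)) (cnt : List String → Int)
    (hb : ∀ v : Int, buckets.getD v [] = D.filter (fun k => cnt k == v)) :
    ∀ (n : Nat) (c : Int) (common : List (List String)), c.toNat ≤ n →
      common.length ≤ 10 →
      bucketLoop buckets c common = (common ++ pvBucketsHi D cnt (c.toNat - 1)).take 10 := by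
  intro n
  induction n with
  | zero =>
      intro c common hc hlen
      rw [bucketLoop, dif_neg (by omega)]
      have : c.toNat - 1 = 0 := by omega
      rw [this]
      simp [pvBucketsHi, List.take_of_length_le hlen]
  | succ n ih =>
      intro c common hc hlen
      rw [bucketLoop]
      by_cases hcond : 2 ≤ c ∧ common.length < 10
      · rw [dif_pos hcond]
        obtain ⟨hc2, hl10⟩ := hcond
        obtain ⟨k, hk⟩ : ∃ k, c.toNat = k + 2 := ⟨c.toNat - 2, by omega⟩
        have hcast : ((k : Int) + 2) = c := by omega
        rw [hb c, bucketInner_eq _ _ hlen]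
        rw [ih (c - 1) _ (by omega) (by
          simp only [List.length_append, List.length_take]
          omega)]
        have h1 : (c - 1).toNat - 1 = k := by omega
        have h2 : c.toNat - 1 = k + 1 := by omega
        rw [h1, h2, pvBucketsHi, hcast]
        exact take_absorb _ _ _ hl10
      · rw [dif_neg hcond]
        by_cases hc2 : 2 ≤ c
        · have h10 : common.length = 10 := by omega
          rw [List.take_append, List.take_of_length_le (by omega), h10]
          simp
        · have : c.toNat - 1 = 0 := by omega
          rw [this]
          simp [pvBucketsHi, List.take_of_length_le hlen]

-- stable insert commutes with map
theorem insertBy_map {α β : Type} (f : α → β) (before : β → β → Bool) (x : α) (ys : List α) :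
    PySem.List.insertBy before (f x) (ys.map f)
      = (PySem.List.insertBy (fun a b => before (f a) (f b)) x ys).map f := by
  induction ys with
  | nil => simp [PySem.List.insertBy]
  | cons y t ih =>
      simp only [List.map_cons, PySem.List.insertBy]
      by_cases h : before (f x) (f y) = true
      · simp [h]
      · simp [h, ih]

-- sorting a mapped list = mapping the sort under the composed key
theorem sorted_map {α β κ : Type} [LT κ] [DecidableLT κ] (f : α → β) (xs : List α)
    (key : β → κ) (rev : Bool) :
    PySem.List.sorted (xs.map f) key rev
      = (PySem.List.sorted xs (fun a => key (f a)) rev).map f := by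
  simp only [PySem.List.sorted, List.foldl_map]
  have h : ∀ (acc : List α),
      xs.foldl (fun acc x =>
          PySem.List.insertBy
            (if rev = true then fun a b => decide (key b < key a) else fun a b => decide (key a < key b))
            (f x) acc) (acc.map f)
        = (xs.foldl (fun acc x =>
            PySem.List.insertBy
              (if rev = true then fun a b => decide (key (f b) < key (f a)) else fun a b => decide (key (f a) < key (f b)))
              x acc) acc).map f := by
    induction xs with
    | nil => intro acc; simp
    | cons x t ih =>
        intro acc
        simp only [List.foldl_cons]
        rw [insertBy_map, ← ih]
        cases rev <;> simp
  simpa using h []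

-- ===== VERDICT (by name: the statement is the Claim_ definition above) =====
theorem find_common_sequences_py_spec : Claim_equal_find_common_sequences_py := by
  intro sequences _
  show find_common_sequences_py sequences = find_common_sequences_py_alt sequences
  unfold find_common_sequences_py find_common_sequences_py_alt
  simp only [PySem.Dict.foldl_insert_getD_add_one_eq_counter, ← PySem.Dict.counter_eq_foldl,
    PySem.Dict.items_counter]
  set D := PySem.Set.ofList sequences with hDdef
  set cnt : List String → Int := fun k => ((List.count k sequences : Nat) : Int) with hcnt
  set bkts := List.foldl (fun d p => d.modify p.2 [] fun x => x ++ [p.1]) PySem.Dict.empty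
    (D.map (fun k => (k, cnt k))) with hbkts
  set m := PySem.List.maxD bkts.keys (fun x => x) 0 with hm
  have hfold : bkts = List.foldl (fun d p => d.modify p.1 [] fun x => x ++ [p.2])
      PySem.Dict.empty (D.map (fun k => (cnt k, k))) := by
    rw [hbkts]; simp only [List.foldl_map]
  have hget : ∀ v : Int, bkts.getD v [] = D.filter (fun k => cnt k == v) := by
    intro v
    rw [hfold, PySem.Dict.getD_foldl_modify_append, PySem.Dict.getD_empty]
    simp [List.filter_map, List.map_map, Function.comp_def]
  have hkeys : bkts.keys = PySem.Set.ofList (D.map cnt) := by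
    rw [hfold, PySem.Dict.keys_foldl_modify_key]
    simp only [pysem, List.map_map]
    rw [show PySem.Set.ofList (List.map cnt D)
          = List.foldl (fun s b => PySem.Set.add s b) [] (List.map cnt D) from rfl,
      List.foldl_map]
    simp
  have h1c : ∀ k ∈ D, 1 ≤ cnt k := by
    intro k hk
    rw [hDdef] at hk
    have hmem : k ∈ sequences := (PySem.Set.mem_ofList _ _).1 hk
    have hpos : 0 < List.count k sequences := List.count_pos_iff.mpr hmem
    simp only [hcnt]
    exact_mod_cast hpos
  have hub : ∀ k ∈ D, cnt k ≤ m := by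
    intro k hk
    rw [hm]
    apply PySem.List.le_maxD_id
    rw [hkeys]
    exact (PySem.Set.mem_ofList _ _).2 (List.mem_map_of_mem hk)
  have h0m : 0 ≤ m := by
    rcases hKnil : bkts.keys with _ | ⟨y, ys⟩
    · rw [hm, hKnil, PySem.List.maxD_nil]
    · have hmem := PySem.List.maxD_mem bkts.keys (fun x => x) 0 (by rw [hKnil]; simp)
      rw [← hm, hkeys] at hmem
      have := (PySem.Set.mem_ofList _ _).1 hmem
      obtain ⟨k, -, hkk⟩ := List.mem_map.1 this
      rw [← hkk]
      simp [hcnt]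
  rw [PySem.List.foldl_append_ite (p := fun p : (List String) × Int => p.2 ≥ 2)
    (f := fun p : (List String) × Int => p.1)]
  rw [sorted_map (fun k => (k, cnt k)) D (fun p => p.2) true]
  have hkey : (fun a => ((fun k => ((k : List String), cnt k)) a).2) = cnt := rfl
  rw [hkey]
  rw [← List.map_take, List.filter_map]
  simp only [List.map_map, List.nil_append]
  rw [sorted_eq_pvBucketsCat D cnt m.toNat
    (fun k hk => ⟨h1c k hk, by rw [Int.toNat_of_nonneg h0m]; exact hub k hk⟩)]
  rw [bucketLoop_eq bkts D cnt hget m.toNat m [] le_rfl (by simp)]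
  simp only [List.nil_append, Function.comp_def, List.map_id']
  rcases hn : m.toNat with _ | j
  · have hDnil : D = [] := by
      rcases hDD : D with _ | ⟨k, t⟩
      · rfl
      · exfalso
        have h1 := h1c k (by rw [hDD]; exact List.mem_cons_self)
        have h2 := hub k (by rw [hDD]; exact List.mem_cons_self)
        omega
    rw [hDnil]
    simp [pvBucketsCat, pvBucketsHi]
  · rw [pvBucketsCat_split]
    simp only [Nat.add_sub_cancel]
    rw [List.take_append, List.filter_append]
    have hA1 : List.filter (fun x => decide (cnt x ≥ 2)) ((pvBucketsHi D cnt j).take 10)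
        = (pvBucketsHi D cnt j).take 10 :=
      List.filter_eq_self.mpr (fun x hx => by
        have h2 := mem_pvBucketsHi (List.take_subset _ _ hx)
        simp only [decide_eq_true_eq]
        omega)
    have hA2 : List.filter (fun x => decide (cnt x ≥ 2))
        ((D.filter (fun k => cnt k == (1 : Int))).take (10 - (pvBucketsHi D cnt j).length))
          = [] := by
      apply List.filter_eq_nil_iff.mpr
      intro x hx
      have hx2 := List.take_subset _ _ hx
      simp only [List.mem_filter, beq_iff_eq] at hx2
      simp only [decide_eq_true_eq]
      omega
    rw [hA1, hA2, List.append_nil]
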